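-- pv_equiv track=rewrite | github.com/codebicycle/python-practice-two | roman_numerals.py | roman_substitution
-- ===== SOURCE A (Python) =====
-- def roman_substitution(roman_str):
--     SUBSTITUTIONS = {
--         'VIIII': 'IX',
--         'IIII': 'IV',
--         'LXXXX': 'XC',
--         'XXXX': 'XL',
--         'DCCCC': 'CM',
--         'CCCC': 'CD',
--     }
--     for old, new in SUBSTITUTIONS.items():
--         roman_str = roman_str.replace(old, new)
--
--     return roman_str
-- ===== SOURCE B (Python) =====
-- def roman_substitution(roman_str):
--     PATTERNS = [
--         ('VIIII', 'IX'),
--         ('IIII', 'IV'),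
--         ('LXXXX', 'XC'),
--         ('XXXX', 'XL'),
--         ('DCCCC', 'CM'),
--         ('CCCC', 'CD'),
--     ]
--     pieces = []
--     i = 0
--     n = len(roman_str)
--     while i < n:
--         for old, new in PATTERNS:
--             if roman_str.startswith(old, i):
--                 pieces.append(new)
--                 i += len(old)
--                 break
--         else:
--             pieces.append(roman_str[i])
--             i += 1
--     return ''.join(pieces)
-- ===== Notes on version B (the rewrite author's own statement) =====
-- stated objective: alternative
-- what changed: Six sequential full-string replace passes (one per subtractive pattern) are replaced by a single left-to-right scan that, at each position, emits the replacement of the first matching pattern or copies the character.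
-- outside the precondition, e.g. on roman_substitution('IIIVIIII'): A returns 'IVX', B returns 'IIIIX'; on roman_substitution('LXXXXCCC'): A returns 'XCD', B returns 'XCCCC'; on roman_substitution('VIIIIXXX'): A returns 'IXL', B returns 'IXXXX'
import Mathlib
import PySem

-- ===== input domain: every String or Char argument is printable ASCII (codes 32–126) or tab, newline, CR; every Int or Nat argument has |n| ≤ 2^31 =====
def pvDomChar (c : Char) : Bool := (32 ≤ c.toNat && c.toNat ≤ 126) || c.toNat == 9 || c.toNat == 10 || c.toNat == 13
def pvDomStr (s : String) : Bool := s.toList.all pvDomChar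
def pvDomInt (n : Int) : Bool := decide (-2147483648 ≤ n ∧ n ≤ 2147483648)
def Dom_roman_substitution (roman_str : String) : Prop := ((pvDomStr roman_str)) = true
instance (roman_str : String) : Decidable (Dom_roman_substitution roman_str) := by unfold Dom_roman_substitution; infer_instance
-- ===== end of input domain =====

-- B re-implements A's six sequential full-string replace passes as a single left-to-right
-- scan (objective: alternative single-pass algorithm, same results on Pre_).

-- ===== PORT A =====
def roman_substitution (roman_str : String) : String :=
  let SUBSTITUTIONS : PySem.Dict String String := PySem.Dict.ofList
    [("VIIII", "IX"), ("IIII", "IV"), ("LXXXX", "XC"),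
     ("XXXX", "XL"), ("DCCCC", "CM"), ("CCCC", "CD")]
  SUBSTITUTIONS.items.foldl (fun acc p => PySem.Str.replace acc p.1 p.2) roman_str

-- ===== PORT B =====
-- single left-to-right scan: at each position emit the first matching pattern's
-- replacement (patterns in Source B's order), else copy the character
def scanB : List Char → List Char
  | [] => []
  | c :: t =>
    if ['V','I','I','I','I'].isPrefixOf (c :: t) then 'I' :: 'X' :: scanB ((c :: t).drop 5)
    else if ['I','I','I','I'].isPrefixOf (c :: t) then 'I' :: 'V' :: scanB ((c :: t).drop 4)
    else if ['L','X','X','X','X'].isPrefixOf (c :: t) then 'X' :: 'C' :: scanB ((c :: t).drop 5)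
    else if ['X','X','X','X'].isPrefixOf (c :: t) then 'X' :: 'L' :: scanB ((c :: t).drop 4)
    else if ['D','C','C','C','C'].isPrefixOf (c :: t) then 'C' :: 'M' :: scanB ((c :: t).drop 5)
    else if ['C','C','C','C'].isPrefixOf (c :: t) then 'C' :: 'D' :: scanB ((c :: t).drop 4)
    else c :: scanB t
termination_by l => l.length
decreasing_by all_goals simp

def roman_substitution_alt (roman_str : String) : String :=
  String.ofList (scanB roman_str.toList)

-- ===== PRECONDITION & SPEC =====
-- Pre_ excludes strings containing one of seven cascade contexts in which the output of one of A's
-- earlier replace passes merges with adjacent letters into a pattern for a later pass; on such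
-- malformed numerals A's multi-pass cascade value and B's single-pass value are both defensible.
def pvForbidden : List (List Char) :=
  [['I','I','I','V','I','I','I','I'],
   ['V','I','I','I','I','X','X','X'],
   ['X','X','X','L','X','X','X','X'],
   ['V','I','I','I','I','X','X','L','X','X','X','X'],
   ['L','X','X','X','X','C','C','C'],
   ['C','C','C','D','C','C','C','C'],
   ['L','X','X','X','X','C','C','D','C','C','C','C']]

def Pre_roman_substitution (roman_str : String) : Prop :=
  ∀ p ∈ pvForbidden, ¬ (p <:+: roman_str.toList)
instance (roman_str : String) : Decidable (Pre_roman_substitution roman_str) := by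
  unfold Pre_roman_substitution; infer_instance

def pvWitness_roman_substitution : String := "MCMXCIIII"

def Spec_roman_substitution (roman_str : String) (out : String) : Prop := out = roman_substitution_alt roman_str
instance (roman_str : String) (out : String) : Decidable (Spec_roman_substitution roman_str out) := by unfold Spec_roman_substitution; infer_instance

-- ===== CLAIM (what is proved, stated in full; the proofs are below) =====
def Claim_equal_roman_substitution : Prop := ∀ (roman_str : String), Dom_roman_substitution roman_str → Pre_roman_substitution roman_str → Spec_roman_substitution roman_str (roman_substitution roman_str)

-- ===== LEMMAS AND PROOFS =====

-- one replace pass, fuel-free (mirrors Python str.replace for nonempty old)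
def rep1 (old new : List Char) (l : List Char) : List Char :=
  match l with
  | [] => []
  | c :: t =>
    if old.isPrefixOf (c :: t) then new ++ rep1 old new ((c :: t).drop (max 1 old.length))
    else c :: rep1 old new t
termination_by l.length
decreasing_by all_goals simp

lemma go_eq (old new : List Char) (hold : old ≠ []) :
    ∀ (fuel : Nat) (l acc : List Char), l.length ≤ fuel →
      PySem.Chars.replace.go old new fuel l acc = acc.reverse ++ rep1 old new l := by
  intro fuel
  induction fuel with
  | zero =>
    intro l acc hl
    have : l = [] := List.length_eq_zero_iff.mp (Nat.le_zero.mp hl)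
    subst this
    rw [PySem.Chars.replace.go.eq_def]
    simp [rep1]
  | succ fuel ih =>
    intro l acc hl
    cases l with
    | nil =>
      rw [PySem.Chars.replace.go.eq_def]
      simp [rep1]
    | cons c t =>
      rw [PySem.Chars.replace.go.eq_def]
      simp only []
      by_cases h : old.isPrefixOf (c :: t)
      · simp only [h, if_true]
        have hlen : old.length ≥ 1 := by
          cases old with
          | nil => exact absurd rfl hold
          | cons _ _ => simp
        have hdrop : (List.drop old.length (c :: t)).length ≤ fuel := by
          simp only [List.length_drop, List.length_cons]
          have hl' : t.length + 1 ≤ fuel + 1 := by simpa using hl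
          omega
        rw [ih _ _ hdrop]
        rw [rep1]
        simp only [h, if_true]
        have : max 1 old.length = old.length := by omega
        rw [this]
        simp
      · simp only [h]
        rw [ih t (c :: acc) (by simp at hl ⊢; omega)]
        rw [rep1]
        simp only [h]
        simp

lemma replace_eq_rep1 (old new l : List Char) (hold : old ≠ []) :
    PySem.Chars.replace l old new = rep1 old new l := by
  rw [PySem.Chars.replace]
  have : old.isEmpty = false := by cases old with | nil => exact absurd rfl hold | cons _ _ => rfl
  rw [this]
  simp only [Bool.false_eq_true, if_false]
  rw [go_eq old new hold l.length l [] (le_refl _)]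
  simp

-- the six passes of A, in order
def pvF (l : List Char) : List Char :=
  rep1 ['C','C','C','C'] ['C','D']
    (rep1 ['D','C','C','C','C'] ['C','M']
      (rep1 ['X','X','X','X'] ['X','L']
        (rep1 ['L','X','X','X','X'] ['X','C']
          (rep1 ['I','I','I','I'] ['I','V']
            (rep1 ['V','I','I','I','I'] ['I','X'] l)))))

lemma portA_eq (s : String) : roman_substitution s = String.ofList (pvF s.toList) := by
  have e1 : ∀ l, PySem.Chars.replace l "VIIII".toList "IX".toList = rep1 ['V','I','I','I','I'] ['I','X'] l :=
    fun l => replace_eq_rep1 _ _ l (by decide)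
  have e2 : ∀ l, PySem.Chars.replace l "IIII".toList "IV".toList = rep1 ['I','I','I','I'] ['I','V'] l :=
    fun l => replace_eq_rep1 _ _ l (by decide)
  have e3 : ∀ l, PySem.Chars.replace l "LXXXX".toList "XC".toList = rep1 ['L','X','X','X','X'] ['X','C'] l :=
    fun l => replace_eq_rep1 _ _ l (by decide)
  have e4 : ∀ l, PySem.Chars.replace l "XXXX".toList "XL".toList = rep1 ['X','X','X','X'] ['X','L'] l :=
    fun l => replace_eq_rep1 _ _ l (by decide)
  have e5 : ∀ l, PySem.Chars.replace l "DCCCC".toList "CM".toList = rep1 ['D','C','C','C','C'] ['C','M'] l :=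
    fun l => replace_eq_rep1 _ _ l (by decide)
  have e6 : ∀ l, PySem.Chars.replace l "CCCC".toList "CD".toList = rep1 ['C','C','C','C'] ['C','D'] l :=
    fun l => replace_eq_rep1 _ _ l (by decide)
  have hit : (PySem.Dict.ofList
      [("VIIII", "IX"), ("IIII", "IV"), ("LXXXX", "XC"), ("XXXX", "XL"), ("DCCCC", "CM"), ("CCCC", "CD")]
      : PySem.Dict String String).items
      = [("VIIII", "IX"), ("IIII", "IV"), ("LXXXX", "XC"), ("XXXX", "XL"), ("DCCCC", "CM"), ("CCCC", "CD")] := rfl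
  simp only [roman_substitution, PySem.Str.replace, hit, List.foldl, String.toList_ofList,
    e1, e2, e3, e4, e5, e6, pvF]

-- prefix-pattern transfer: a pattern containing no copy of new's first char survives a pass backwards
lemma patP (old : List Char) (n1 : Char) (nr : List Char) (P : List Char) (hn : n1 ∉ P) :
    ∀ (l p : List Char), p <:+ P → p <+: rep1 old (n1 :: nr) l → p <+: l := by
  intro l
  induction l using rep1.induct (old := old) with
  | case1 =>
    intro p _ hp
    simpa [rep1] using hp
  | case2 c t h ih =>
    intro p hsuf hp
    rw [rep1.eq_def] at hp
    simp only [h, if_true] at hp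
    cases p with
    | nil => exact List.nil_prefix
    | cons a q =>
      have ha : a = n1 := (List.cons_prefix_cons.mp hp).1
      exact absurd (hsuf.subset (by simp [ha])) hn
  | case3 c t h ih =>
    intro p hsuf hp
    rw [rep1.eq_def] at hp
    simp only [h] at hp
    cases p with
    | nil => exact List.nil_prefix
    | cons a q =>
      obtain ⟨ha, hq⟩ := List.cons_prefix_cons.mp hp
      subst ha
      exact List.cons_prefix_cons.mpr ⟨rfl, ih q ((List.suffix_cons a q).trans hsuf) hq⟩

-- run transfer when new = [x, n2] with n2 ≠ x: a leading x-run comes from a literal run or run++old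
lemma runP2 (old : List Char) (x n2 : Char) (hx : n2 ≠ x) :
    ∀ (l : List Char) (k : Nat), List.replicate k x <+: rep1 old [x, n2] l →
      List.replicate k x <+: l ∨ ∃ j, k = j + 1 ∧ List.replicate j x ++ old <+: l := by
  intro l
  induction l using rep1.induct (old := old) with
  | case1 =>
    intro k hp
    simp [rep1] at hp
    simp [hp]
  | case2 c t h ih =>
    intro k hp
    rw [rep1.eq_def] at hp
    simp only [h, if_true] at hp
    match k with
    | 0 => exact Or.inl List.nil_prefix
    | 1 =>
      refine Or.inr ⟨0, rfl, ?_⟩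
      simpa using List.isPrefixOf_iff_prefix.mp h
    | (k + 2) =>
      exfalso
      rw [List.replicate_succ, List.replicate_succ] at hp
      have := (List.cons_prefix_cons.mp (List.cons_prefix_cons.mp hp).2).1
      exact hx this.symm
  | case3 c t h ih =>
    intro k hp
    rw [rep1.eq_def] at hp
    simp only [h] at hp
    match k with
    | 0 => exact Or.inl List.nil_prefix
    | (k + 1) =>
      rw [List.replicate_succ] at hp
      obtain ⟨hxc, hq⟩ := List.cons_prefix_cons.mp hp
      subst hxc
      rcases ih k hq with h1 | ⟨j, hj, h2⟩
      · exact Or.inl (by rw [List.replicate_succ]; exact List.cons_prefix_cons.mpr ⟨rfl, h1⟩)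
      · refine Or.inr ⟨j + 1, by omega, ?_⟩
        rw [List.replicate_succ, List.cons_append]
        exact List.cons_prefix_cons.mpr ⟨rfl, h2⟩

lemma rep1_append (old new r : List Char) (hold : old ≠ []) :
    rep1 old new (old ++ r) = new ++ rep1 old new r := by
  cases h : old ++ r with
  | nil => simp at h; exact absurd h.1 hold
  | cons c t =>
    rw [← h, rep1.eq_def]
    rw [h]
    have hpre : old.isPrefixOf (c :: t) = true := by
      rw [← h]; exact List.isPrefixOf_iff_prefix.mpr ⟨r, rfl⟩
    simp only [hpre, if_true]
    have hlen : max 1 old.length = old.length := by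
      cases old with
      | nil => exact absurd rfl hold
      | cons _ _ => simp
    rw [← h, hlen, List.drop_left]

lemma rep1_not_pre (old new : List Char) (c : Char) (t : List Char) (h : ¬ old <+: (c :: t)) :
    rep1 old new (c :: t) = c :: rep1 old new t := by
  rw [rep1.eq_def]
  have : old.isPrefixOf (c :: t) = false := by
    rw [← Bool.not_eq_true]
    intro hc
    exact h (List.isPrefixOf_iff_prefix.mp hc)
  simp [this]

def PreL (l : List Char) : Prop := ∀ p ∈ pvForbidden, ¬ (p <:+: l)

lemma PreL_suffix {l r : List Char} (h : PreL l) (hr : r <:+ l) : PreL r := by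
  intro p hp hinf
  exact h p hp (hinf.trans hr.isInfix)


lemma pvInf (a : List Char) {p r : List Char} (h : p <+: r) : (a ++ p) <:+: (a ++ r) := by
  obtain ⟨u, hu⟩ := h
  exact ⟨[], u, by simp [← hu]⟩

lemma transfer2 {P l p : List Char} (hI : 'I' ∉ P) (hs : p <:+ P)
    (h : p <+: rep1 ['I','I','I','I'] ['I','V'] (rep1 ['V','I','I','I','I'] ['I','X'] l)) : p <+: l :=
  patP _ 'I' ['X'] P hI _ _ hs (patP _ 'I' ['V'] P hI _ _ hs h)

lemma transfer4 {P l p : List Char} (hI : 'I' ∉ P) (hX : 'X' ∉ P) (hs : p <:+ P)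
    (h : p <+: rep1 ['X','X','X','X'] ['X','L'] (rep1 ['L','X','X','X','X'] ['X','C']
      (rep1 ['I','I','I','I'] ['I','V'] (rep1 ['V','I','I','I','I'] ['I','X'] l)))) : p <+: l :=
  transfer2 hI hs (patP _ 'X' ['C'] P hX _ _ hs (patP _ 'X' ['L'] P hX _ _ hs h))


lemma push1_I (t : List Char) : rep1 ['V','I','I','I','I'] ['I','X'] ('I' :: t) = 'I' :: rep1 ['V','I','I','I','I'] ['I','X'] t :=
  rep1_not_pre _ _ _ _ (by simp [List.cons_prefix_cons])

lemma push1_L (t : List Char) : rep1 ['V','I','I','I','I'] ['I','X'] ('L' :: t) = 'L' :: rep1 ['V','I','I','I','I'] ['I','X'] t :=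
  rep1_not_pre _ _ _ _ (by simp [List.cons_prefix_cons])

lemma push1_X (t : List Char) : rep1 ['V','I','I','I','I'] ['I','X'] ('X' :: t) = 'X' :: rep1 ['V','I','I','I','I'] ['I','X'] t :=
  rep1_not_pre _ _ _ _ (by simp [List.cons_prefix_cons])

lemma push1_D (t : List Char) : rep1 ['V','I','I','I','I'] ['I','X'] ('D' :: t) = 'D' :: rep1 ['V','I','I','I','I'] ['I','X'] t :=
  rep1_not_pre _ _ _ _ (by simp [List.cons_prefix_cons])

lemma push1_C (t : List Char) : rep1 ['V','I','I','I','I'] ['I','X'] ('C' :: t) = 'C' :: rep1 ['V','I','I','I','I'] ['I','X'] t :=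
  rep1_not_pre _ _ _ _ (by simp [List.cons_prefix_cons])

lemma push2_L (t : List Char) : rep1 ['I','I','I','I'] ['I','V'] ('L' :: t) = 'L' :: rep1 ['I','I','I','I'] ['I','V'] t :=
  rep1_not_pre _ _ _ _ (by simp [List.cons_prefix_cons])

lemma push2_X (t : List Char) : rep1 ['I','I','I','I'] ['I','V'] ('X' :: t) = 'X' :: rep1 ['I','I','I','I'] ['I','V'] t :=
  rep1_not_pre _ _ _ _ (by simp [List.cons_prefix_cons])

lemma push2_D (t : List Char) : rep1 ['I','I','I','I'] ['I','V'] ('D' :: t) = 'D' :: rep1 ['I','I','I','I'] ['I','V'] t :=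
  rep1_not_pre _ _ _ _ (by simp [List.cons_prefix_cons])

lemma push2_C (t : List Char) : rep1 ['I','I','I','I'] ['I','V'] ('C' :: t) = 'C' :: rep1 ['I','I','I','I'] ['I','V'] t :=
  rep1_not_pre _ _ _ _ (by simp [List.cons_prefix_cons])

lemma push3_I (t : List Char) : rep1 ['L','X','X','X','X'] ['X','C'] ('I' :: t) = 'I' :: rep1 ['L','X','X','X','X'] ['X','C'] t :=
  rep1_not_pre _ _ _ _ (by simp [List.cons_prefix_cons])

lemma push3_V (t : List Char) : rep1 ['L','X','X','X','X'] ['X','C'] ('V' :: t) = 'V' :: rep1 ['L','X','X','X','X'] ['X','C'] t :=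
  rep1_not_pre _ _ _ _ (by simp [List.cons_prefix_cons])

lemma push3_X (t : List Char) : rep1 ['L','X','X','X','X'] ['X','C'] ('X' :: t) = 'X' :: rep1 ['L','X','X','X','X'] ['X','C'] t :=
  rep1_not_pre _ _ _ _ (by simp [List.cons_prefix_cons])

lemma push3_D (t : List Char) : rep1 ['L','X','X','X','X'] ['X','C'] ('D' :: t) = 'D' :: rep1 ['L','X','X','X','X'] ['X','C'] t :=
  rep1_not_pre _ _ _ _ (by simp [List.cons_prefix_cons])

lemma push3_C (t : List Char) : rep1 ['L','X','X','X','X'] ['X','C'] ('C' :: t) = 'C' :: rep1 ['L','X','X','X','X'] ['X','C'] t :=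
  rep1_not_pre _ _ _ _ (by simp [List.cons_prefix_cons])

lemma push4_I (t : List Char) : rep1 ['X','X','X','X'] ['X','L'] ('I' :: t) = 'I' :: rep1 ['X','X','X','X'] ['X','L'] t :=
  rep1_not_pre _ _ _ _ (by simp [List.cons_prefix_cons])

lemma push4_V (t : List Char) : rep1 ['X','X','X','X'] ['X','L'] ('V' :: t) = 'V' :: rep1 ['X','X','X','X'] ['X','L'] t :=
  rep1_not_pre _ _ _ _ (by simp [List.cons_prefix_cons])

lemma push4_D (t : List Char) : rep1 ['X','X','X','X'] ['X','L'] ('D' :: t) = 'D' :: rep1 ['X','X','X','X'] ['X','L'] t :=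
  rep1_not_pre _ _ _ _ (by simp [List.cons_prefix_cons])

lemma push4_C (t : List Char) : rep1 ['X','X','X','X'] ['X','L'] ('C' :: t) = 'C' :: rep1 ['X','X','X','X'] ['X','L'] t :=
  rep1_not_pre _ _ _ _ (by simp [List.cons_prefix_cons])

lemma push5_I (t : List Char) : rep1 ['D','C','C','C','C'] ['C','M'] ('I' :: t) = 'I' :: rep1 ['D','C','C','C','C'] ['C','M'] t :=
  rep1_not_pre _ _ _ _ (by simp [List.cons_prefix_cons])

lemma push5_V (t : List Char) : rep1 ['D','C','C','C','C'] ['C','M'] ('V' :: t) = 'V' :: rep1 ['D','C','C','C','C'] ['C','M'] t :=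
  rep1_not_pre _ _ _ _ (by simp [List.cons_prefix_cons])

lemma push5_X (t : List Char) : rep1 ['D','C','C','C','C'] ['C','M'] ('X' :: t) = 'X' :: rep1 ['D','C','C','C','C'] ['C','M'] t :=
  rep1_not_pre _ _ _ _ (by simp [List.cons_prefix_cons])

lemma push5_L (t : List Char) : rep1 ['D','C','C','C','C'] ['C','M'] ('L' :: t) = 'L' :: rep1 ['D','C','C','C','C'] ['C','M'] t :=
  rep1_not_pre _ _ _ _ (by simp [List.cons_prefix_cons])

lemma push5_C (t : List Char) : rep1 ['D','C','C','C','C'] ['C','M'] ('C' :: t) = 'C' :: rep1 ['D','C','C','C','C'] ['C','M'] t :=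
  rep1_not_pre _ _ _ _ (by simp [List.cons_prefix_cons])

lemma push6_I (t : List Char) : rep1 ['C','C','C','C'] ['C','D'] ('I' :: t) = 'I' :: rep1 ['C','C','C','C'] ['C','D'] t :=
  rep1_not_pre _ _ _ _ (by simp [List.cons_prefix_cons])

lemma push6_V (t : List Char) : rep1 ['C','C','C','C'] ['C','D'] ('V' :: t) = 'V' :: rep1 ['C','C','C','C'] ['C','D'] t :=
  rep1_not_pre _ _ _ _ (by simp [List.cons_prefix_cons])

lemma push6_X (t : List Char) : rep1 ['C','C','C','C'] ['C','D'] ('X' :: t) = 'X' :: rep1 ['C','C','C','C'] ['C','D'] t :=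
  rep1_not_pre _ _ _ _ (by simp [List.cons_prefix_cons])

lemma push6_L (t : List Char) : rep1 ['C','C','C','C'] ['C','D'] ('L' :: t) = 'L' :: rep1 ['C','C','C','C'] ['C','D'] t :=
  rep1_not_pre _ _ _ _ (by simp [List.cons_prefix_cons])

lemma p2_IX (t : List Char) : rep1 ['I','I','I','I'] ['I','V'] ('I' :: 'X' :: t) = 'I' :: 'X' :: rep1 ['I','I','I','I'] ['I','V'] t := by
  rw [rep1_not_pre _ _ _ _ (by simp [List.cons_prefix_cons]), rep1_not_pre _ _ _ _ (by simp [List.cons_prefix_cons])]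

lemma p4_XC (t : List Char) : rep1 ['X','X','X','X'] ['X','L'] ('X' :: 'C' :: t) = 'X' :: 'C' :: rep1 ['X','X','X','X'] ['X','L'] t := by
  rw [rep1_not_pre _ _ _ _ (by simp [List.cons_prefix_cons]), rep1_not_pre _ _ _ _ (by simp [List.cons_prefix_cons])]

lemma p6_CM (t : List Char) : rep1 ['C','C','C','C'] ['C','D'] ('C' :: 'M' :: t) = 'C' :: 'M' :: rep1 ['C','C','C','C'] ['C','D'] t := by
  rw [rep1_not_pre _ _ _ _ (by simp [List.cons_prefix_cons]), rep1_not_pre _ _ _ _ (by simp [List.cons_prefix_cons])]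

lemma rep1_match1 (r : List Char) : rep1 ['V','I','I','I','I'] ['I','X'] ('V' :: 'I' :: 'I' :: 'I' :: 'I' :: r) = 'I' :: 'X' :: rep1 ['V','I','I','I','I'] ['I','X'] r :=
  rep1_append ['V','I','I','I','I'] ['I','X'] r (by decide)

lemma rep1_match2 (r : List Char) : rep1 ['I','I','I','I'] ['I','V'] ('I' :: 'I' :: 'I' :: 'I' :: r) = 'I' :: 'V' :: rep1 ['I','I','I','I'] ['I','V'] r :=
  rep1_append ['I','I','I','I'] ['I','V'] r (by decide)

lemma rep1_match3 (r : List Char) : rep1 ['L','X','X','X','X'] ['X','C'] ('L' :: 'X' :: 'X' :: 'X' :: 'X' :: r) = 'X' :: 'C' :: rep1 ['L','X','X','X','X'] ['X','C'] r :=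
  rep1_append ['L','X','X','X','X'] ['X','C'] r (by decide)

lemma rep1_match4 (r : List Char) : rep1 ['X','X','X','X'] ['X','L'] ('X' :: 'X' :: 'X' :: 'X' :: r) = 'X' :: 'L' :: rep1 ['X','X','X','X'] ['X','L'] r :=
  rep1_append ['X','X','X','X'] ['X','L'] r (by decide)

lemma rep1_match5 (r : List Char) : rep1 ['D','C','C','C','C'] ['C','M'] ('D' :: 'C' :: 'C' :: 'C' :: 'C' :: r) = 'C' :: 'M' :: rep1 ['D','C','C','C','C'] ['C','M'] r :=
  rep1_append ['D','C','C','C','C'] ['C','M'] r (by decide)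

lemma rep1_match6 (r : List Char) : rep1 ['C','C','C','C'] ['C','D'] ('C' :: 'C' :: 'C' :: 'C' :: r) = 'C' :: 'D' :: rep1 ['C','C','C','C'] ['C','D'] r :=
  rep1_append ['C','C','C','C'] ['C','D'] r (by decide)

lemma scanB_eq1 (r : List Char) : scanB ('V' :: 'I' :: 'I' :: 'I' :: 'I' :: r) = 'I' :: 'X' :: scanB r := by
  rw [scanB.eq_def]; simp [List.isPrefixOf]

lemma scanB_eq2 (r : List Char) : scanB ('I' :: 'I' :: 'I' :: 'I' :: r) = 'I' :: 'V' :: scanB r := by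
  rw [scanB.eq_def]; simp [List.isPrefixOf]

lemma scanB_eq3 (r : List Char) : scanB ('L' :: 'X' :: 'X' :: 'X' :: 'X' :: r) = 'X' :: 'C' :: scanB r := by
  rw [scanB.eq_def]; simp [List.isPrefixOf]

lemma scanB_eq4 (r : List Char) : scanB ('X' :: 'X' :: 'X' :: 'X' :: r) = 'X' :: 'L' :: scanB r := by
  rw [scanB.eq_def]; simp [List.isPrefixOf]

lemma scanB_eq5 (r : List Char) : scanB ('D' :: 'C' :: 'C' :: 'C' :: 'C' :: r) = 'C' :: 'M' :: scanB r := by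
  rw [scanB.eq_def]; simp [List.isPrefixOf]

lemma scanB_eq6 (r : List Char) : scanB ('C' :: 'C' :: 'C' :: 'C' :: r) = 'C' :: 'D' :: scanB r := by
  rw [scanB.eq_def]; simp [List.isPrefixOf]

lemma scanB_cons (c : Char) (t : List Char)
    (h1 : ¬ (['V','I','I','I','I'].isPrefixOf (c :: t) = true))
    (h2 : ¬ (['I','I','I','I'].isPrefixOf (c :: t) = true))
    (h3 : ¬ (['L','X','X','X','X'].isPrefixOf (c :: t) = true))
    (h4 : ¬ (['X','X','X','X'].isPrefixOf (c :: t) = true))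
    (h5 : ¬ (['D','C','C','C','C'].isPrefixOf (c :: t) = true))
    (h6 : ¬ (['C','C','C','C'].isPrefixOf (c :: t) = true)) :
    scanB (c :: t) = c :: scanB t := by
  rw [scanB.eq_def]; simp [h1, h2, h3, h4, h5, h6]

lemma main_eq : ∀ l : List Char, PreL l → pvF l = scanB l := by
  intro l
  induction l using scanB.induct with
  | case1 =>
    intro _
    simp [pvF, rep1, scanB]
  | case2 c t h ih =>
    intro hpre
    obtain ⟨r, hr⟩ := List.isPrefixOf_iff_prefix.mp h
    injection hr with hc ht
    subst hc; subst ht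
    simp only [List.append_eq, List.cons_append, List.nil_append, List.drop_succ_cons, List.drop_zero] at ih ⊢
    have ihr := ih (PreL_suffix hpre ⟨['V','I','I','I','I'], rfl⟩)
    simp only [pvF] at ihr ⊢
    simp only [rep1_match1, p2_IX, push3_I, push3_X, push4_I, scanB_eq1]
    have hno4 : ¬ (['X','X','X','X'] <+: ('X' :: rep1 ['L','X','X','X','X'] ['X','C'] (rep1 ['I','I','I','I'] ['I','V'] (rep1 ['V','I','I','I','I'] ['I','X'] (r))))) := by
      intro hp
      have h3 : ['X','X','X'] <+: rep1 ['L','X','X','X','X'] ['X','C'] (rep1 ['I','I','I','I'] ['I','V'] (rep1 ['V','I','I','I','I'] ['I','X'] (r))) := (List.cons_prefix_cons.mp hp).2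
      rcases runP2 ['L','X','X','X','X'] 'X' 'C' (by decide) _ 3 h3 with hrun | ⟨j, hj, hpat⟩
      · have h1 := transfer2 (by decide) (List.suffix_refl _) hrun
        exact hpre ['V','I','I','I','I','X','X','X'] (by simp [pvForbidden]) (pvInf ['V','I','I','I','I'] h1)
      · obtain rfl : j = 2 := by omega
        have h1 := transfer2 (by decide) (List.suffix_refl _) hpat
        exact hpre ['V','I','I','I','I','X','X','L','X','X','X','X'] (by simp [pvForbidden]) (pvInf ['V','I','I','I','I'] h1)
    rw [rep1_not_pre _ _ _ _ hno4]
    simp only [push5_I, push5_X, push6_I, push6_X]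
    rw [ihr]
  | case3 c t h1 h ih =>
    intro hpre
    obtain ⟨r, hr⟩ := List.isPrefixOf_iff_prefix.mp h
    injection hr with hc ht
    subst hc; subst ht
    simp only [List.append_eq, List.cons_append, List.nil_append, List.drop_succ_cons, List.drop_zero] at ih ⊢
    have ihr := ih (PreL_suffix hpre ⟨['I','I','I','I'], rfl⟩)
    simp only [pvF] at ihr ⊢
    simp only [push1_I, rep1_match2, push3_I, push3_V, push4_I, push4_V, push5_I, push5_V,
      push6_I, push6_V, scanB_eq2]
    rw [ihr]
  | case4 c t h1 h2 h ih =>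
    intro hpre
    obtain ⟨r, hr⟩ := List.isPrefixOf_iff_prefix.mp h
    injection hr with hc ht
    subst hc; subst ht
    simp only [List.append_eq, List.cons_append, List.nil_append, List.drop_succ_cons, List.drop_zero] at ih ⊢
    have ihr := ih (PreL_suffix hpre ⟨['L','X','X','X','X'], rfl⟩)
    simp only [pvF] at ihr ⊢
    simp only [push1_L, push1_X, push2_L, push2_X, rep1_match3, p4_XC, push5_X, push5_C,
      push6_X, scanB_eq3]
    have hno6 : ¬ (['C','C','C','C'] <+: ('C' :: rep1 ['D','C','C','C','C'] ['C','M'] (rep1 ['X','X','X','X'] ['X','L'] (rep1 ['L','X','X','X','X'] ['X','C'] (rep1 ['I','I','I','I'] ['I','V'] (rep1 ['V','I','I','I','I'] ['I','X'] (r))))))) := by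
      intro hp
      have h3 : ['C','C','C'] <+: rep1 ['D','C','C','C','C'] ['C','M'] (rep1 ['X','X','X','X'] ['X','L'] (rep1 ['L','X','X','X','X'] ['X','C'] (rep1 ['I','I','I','I'] ['I','V'] (rep1 ['V','I','I','I','I'] ['I','X'] (r))))) := (List.cons_prefix_cons.mp hp).2
      rcases runP2 ['D','C','C','C','C'] 'C' 'M' (by decide) _ 3 h3 with hrun | ⟨j, hj, hpat⟩
      · have hx := transfer4 (by decide) (by decide) (List.suffix_refl _) hrun
        exact hpre ['L','X','X','X','X','C','C','C'] (by simp [pvForbidden]) (pvInf ['L','X','X','X','X'] hx)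
      · obtain rfl : j = 2 := by omega
        have hx := transfer4 (by decide) (by decide) (List.suffix_refl _) hpat
        exact hpre ['L','X','X','X','X','C','C','D','C','C','C','C'] (by simp [pvForbidden]) (pvInf ['L','X','X','X','X'] hx)
    rw [rep1_not_pre _ _ _ _ hno6]
    rw [ihr]
  | case5 c t h1 h2 h3 h ih =>
    intro hpre
    obtain ⟨r, hr⟩ := List.isPrefixOf_iff_prefix.mp h
    injection hr with hc ht
    subst hc; subst ht
    simp only [List.append_eq, List.cons_append, List.nil_append, List.drop_succ_cons, List.drop_zero] at ih ⊢
    have ihr := ih (PreL_suffix hpre ⟨['X','X','X','X'], rfl⟩)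
    simp only [pvF] at ihr ⊢
    simp only [push1_X, push2_X, push3_X, rep1_match4, push5_X, push5_L, push6_X, push6_L, scanB_eq4]
    rw [ihr]
  | case6 c t h1 h2 h3 h4 h ih =>
    intro hpre
    obtain ⟨r, hr⟩ := List.isPrefixOf_iff_prefix.mp h
    injection hr with hc ht
    subst hc; subst ht
    simp only [List.append_eq, List.cons_append, List.nil_append, List.drop_succ_cons, List.drop_zero] at ih ⊢
    have ihr := ih (PreL_suffix hpre ⟨['D','C','C','C','C'], rfl⟩)
    simp only [pvF] at ihr ⊢
    simp only [push1_D, push1_C, push2_D, push2_C, push3_D, push3_C, push4_D, push4_C,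
      rep1_match5, p6_CM, scanB_eq5]
    rw [ihr]
  | case7 c t h1 h2 h3 h4 h5 h ih =>
    intro hpre
    obtain ⟨r, hr⟩ := List.isPrefixOf_iff_prefix.mp h
    injection hr with hc ht
    subst hc; subst ht
    simp only [List.append_eq, List.cons_append, List.nil_append, List.drop_succ_cons, List.drop_zero] at ih ⊢
    have ihr := ih (PreL_suffix hpre ⟨['C','C','C','C'], rfl⟩)
    simp only [pvF] at ihr ⊢
    simp only [push1_C, push2_C, push3_C, push4_C, push5_C, rep1_match6, scanB_eq6]
    rw [ihr]
  | case8 c t hn1 hn2 hn3 hn4 hn5 hn6 ih =>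
    intro hpre
    have k1 : ¬ (['V','I','I','I','I'] <+: (c :: t)) := fun hp => hn1 (List.isPrefixOf_iff_prefix.mpr hp)
    have k2 : ¬ (['I','I','I','I'] <+: (c :: t)) := fun hp => hn2 (List.isPrefixOf_iff_prefix.mpr hp)
    have k3 : ¬ (['L','X','X','X','X'] <+: (c :: t)) := fun hp => hn3 (List.isPrefixOf_iff_prefix.mpr hp)
    have k4 : ¬ (['X','X','X','X'] <+: (c :: t)) := fun hp => hn4 (List.isPrefixOf_iff_prefix.mpr hp)
    have k5 : ¬ (['D','C','C','C','C'] <+: (c :: t)) := fun hp => hn5 (List.isPrefixOf_iff_prefix.mpr hp)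
    have k6 : ¬ (['C','C','C','C'] <+: (c :: t)) := fun hp => hn6 (List.isPrefixOf_iff_prefix.mpr hp)
    simp only [pvF]
    rw [rep1_not_pre _ _ _ _ k1]
    have m2 : ¬ (['I','I','I','I'] <+: (c :: rep1 ['V','I','I','I','I'] ['I','X'] (t))) := by
      intro hp
      obtain ⟨hc, hq⟩ := List.cons_prefix_cons.mp hp
      rcases runP2 ['V','I','I','I','I'] 'I' 'X' (by decide) _ 3 hq with hrun | ⟨j, hj, hpat⟩
      · exact k2 (by rw [← hc]; exact List.cons_prefix_cons.mpr ⟨rfl, hrun⟩)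
      · obtain rfl : j = 2 := by omega
        apply hpre ['I','I','I','V','I','I','I','I'] (by simp [pvForbidden])
        exact (show (['I','I','I','V','I','I','I','I'] : List Char) <+: (c :: t) by
          rw [← hc]; exact List.cons_prefix_cons.mpr ⟨rfl, hpat⟩).isInfix
    rw [rep1_not_pre _ _ _ _ m2]
    have m3 : ¬ (['L','X','X','X','X'] <+: (c :: rep1 ['I','I','I','I'] ['I','V'] (rep1 ['V','I','I','I','I'] ['I','X'] (t)))) := by
      intro hp
      obtain ⟨hc, hq⟩ := List.cons_prefix_cons.mp hp
      have hx := transfer2 (by decide) (List.suffix_refl _) hq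
      exact k3 (by rw [← hc]; exact List.cons_prefix_cons.mpr ⟨rfl, hx⟩)
    rw [rep1_not_pre _ _ _ _ m3]
    have m4 : ¬ (['X','X','X','X'] <+: (c :: rep1 ['L','X','X','X','X'] ['X','C'] (rep1 ['I','I','I','I'] ['I','V'] (rep1 ['V','I','I','I','I'] ['I','X'] (t))))) := by
      intro hp
      obtain ⟨hc, hq⟩ := List.cons_prefix_cons.mp hp
      rcases runP2 ['L','X','X','X','X'] 'X' 'C' (by decide) _ 3 hq with hrun | ⟨j, hj, hpat⟩
      · have hx := transfer2 (by decide) (List.suffix_refl _) hrun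
        exact k4 (by rw [← hc]; exact List.cons_prefix_cons.mpr ⟨rfl, hx⟩)
      · obtain rfl : j = 2 := by omega
        have hx := transfer2 (by decide) (List.suffix_refl _) hpat
        apply hpre ['X','X','X','L','X','X','X','X'] (by simp [pvForbidden])
        exact (show (['X','X','X','L','X','X','X','X'] : List Char) <+: (c :: t) by
          rw [← hc]; exact List.cons_prefix_cons.mpr ⟨rfl, hx⟩).isInfix
    rw [rep1_not_pre _ _ _ _ m4]
    have m5 : ¬ (['D','C','C','C','C'] <+: (c :: rep1 ['X','X','X','X'] ['X','L'] (rep1 ['L','X','X','X','X'] ['X','C'] (rep1 ['I','I','I','I'] ['I','V'] (rep1 ['V','I','I','I','I'] ['I','X'] (t)))))) := by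
      intro hp
      obtain ⟨hc, hq⟩ := List.cons_prefix_cons.mp hp
      have hx := transfer4 (by decide) (by decide) (List.suffix_refl _) hq
      exact k5 (by rw [← hc]; exact List.cons_prefix_cons.mpr ⟨rfl, hx⟩)
    rw [rep1_not_pre _ _ _ _ m5]
    have m6 : ¬ (['C','C','C','C'] <+: (c :: rep1 ['D','C','C','C','C'] ['C','M'] (rep1 ['X','X','X','X'] ['X','L'] (rep1 ['L','X','X','X','X'] ['X','C'] (rep1 ['I','I','I','I'] ['I','V'] (rep1 ['V','I','I','I','I'] ['I','X'] (t))))))) := by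
      intro hp
      obtain ⟨hc, hq⟩ := List.cons_prefix_cons.mp hp
      rcases runP2 ['D','C','C','C','C'] 'C' 'M' (by decide) _ 3 hq with hrun | ⟨j, hj, hpat⟩
      · have hx := transfer4 (by decide) (by decide) (List.suffix_refl _) hrun
        exact k6 (by rw [← hc]; exact List.cons_prefix_cons.mpr ⟨rfl, hx⟩)
      · obtain rfl : j = 2 := by omega
        have hx := transfer4 (by decide) (by decide) (List.suffix_refl _) hpat
        apply hpre ['C','C','C','D','C','C','C','C'] (by simp [pvForbidden])
        exact (show (['C','C','C','D','C','C','C','C'] : List Char) <+: (c :: t) by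
          rw [← hc]; exact List.cons_prefix_cons.mpr ⟨rfl, hx⟩).isInfix
    rw [rep1_not_pre _ _ _ _ m6]
    rw [scanB_cons c t hn1 hn2 hn3 hn4 hn5 hn6]
    have ihr := ih (PreL_suffix hpre ⟨[c], rfl⟩)
    simp only [pvF] at ihr
    rw [ihr]


-- ===== VERDICT (by name: the statement is the Claim_ definition above) =====
theorem roman_substitution_spec : Claim_equal_roman_substitution := by
  intro s _ hpre
  unfold Spec_roman_substitution roman_substitution_alt
  rw [portA_eq, main_eq s.toList hpre]
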